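-- pv_equiv track=rewrite | github.com/NigrumAquila/py_checkio | github/paper_dice.py | paper_dice
-- ===== SOURCE A (Python) =====
-- def paper_dice(paper):
--     cells = {(x, y): int(value) for y, row in enumerate(paper)
--                                 for x, value in enumerate(row) if value != ' '}
--
--     def rotate(cube, s):
--         sx, sy = s
--         return {((-z * sx, y, x * sx), (x, -z * sy, y * sy))[sy != 0]: value
--                 for (x, y, z), value in cube.items()}
--
--     def mark(cube, pos):
--         cube[(0, 0, 1)] = cells[pos]
--         del cells[pos]
--         for s in (1, 0), (-1, 0), (0, 1), (0, -1):
--             new_pos = pos[0] + s[0], pos[1] + s[1]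
--             if new_pos in cells:
--                 cube = rotate(mark(rotate(cube, s), new_pos), (-s[0], -s[1]))
--         return cube
--
--     cube = mark({}, next(iter(cells)))
--     return (len(cube) == 6 and
--             cube[(1, 0, 0)] + cube[(-1, 0, 0)] ==
--             cube[(0, 1, 0)] + cube[(0, -1, 0)] ==
--             cube[(0, 0, 1)] + cube[(0, 0, -1)] == 7)
-- ===== SOURCE B (Python) =====
-- def paper_dice(paper):
--     cells = {}
--     for y, row in enumerate(paper):
--         for x, ch in enumerate(row):
--             if ch != ' ':
--                 cells[(x, y)] = int(ch)
--     start = next(iter(cells))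
--
--     def step_map(s):
--         # the linear key map f_s of one grid step s, as images of the 3 basis vectors
--         sx, sy = s
--         if sy == 0:
--             return ((0, 0, sx), (0, 1, 0), (-sx, 0, 0))
--         return ((1, 0, 0), (0, 0, sy), (0, -sy, 0))
--
--     def apply(o, v):
--         a, b, c = v
--         return tuple(a * o[0][k] + b * o[1][k] + c * o[2][k] for k in range(3))
--
--     def compose(o, s):
--         m = step_map((-s[0], -s[1]))
--         return (apply(o, m[0]), apply(o, m[1]), apply(o, m[2]))
--
--     faces = {}
--     stack = [(start, ((1, 0, 0), (0, 1, 0), (0, 0, 1)))]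
--     while stack:
--         pos, o = stack.pop()
--         if pos not in cells:
--             continue
--         faces[apply(o, (0, 0, 1))] = cells.pop(pos)
--         for s in (0, -1), (0, 1), (-1, 0), (1, 0):
--             stack.append(((pos[0] + s[0], pos[1] + s[1]), compose(o, s)))
--     return (len(faces) == 6 and
--             faces[(1, 0, 0)] + faces[(-1, 0, 0)] ==
--             faces[(0, 1, 0)] + faces[(0, -1, 0)] ==
--             faces[(0, 0, 1)] + faces[(0, 0, -1)] == 7)
-- ===== Notes on version B (the rewrite author's own statement) =====
-- stated objective: alternative
-- what changed: Replaces A's recursion that re-keys (rotates) the whole cube dict at every step down and back up with an iterative explicit-stack DFS that carries a per-cell 3x3 orientation matrix and writes each cell's value directly to its global face vector, never touching previously assigned faces.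
import Mathlib
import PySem

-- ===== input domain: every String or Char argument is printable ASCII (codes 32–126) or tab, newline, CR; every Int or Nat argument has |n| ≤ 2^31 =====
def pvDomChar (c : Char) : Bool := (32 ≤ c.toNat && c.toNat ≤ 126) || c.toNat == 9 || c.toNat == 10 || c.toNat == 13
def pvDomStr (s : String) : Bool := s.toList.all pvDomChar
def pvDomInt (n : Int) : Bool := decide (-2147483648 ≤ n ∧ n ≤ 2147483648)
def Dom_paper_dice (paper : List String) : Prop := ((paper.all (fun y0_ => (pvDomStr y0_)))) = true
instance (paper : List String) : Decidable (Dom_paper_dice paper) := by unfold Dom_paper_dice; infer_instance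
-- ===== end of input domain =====

-- Port A folds the paper by recursively rotating the whole cube dict around each edge;
-- port B (alternative, same cost) walks the net iteratively with an explicit stack carrying a
-- per-cell orientation matrix and assigns each face vector directly.


abbrev pvPos := Int × Int
abbrev pvV := Int × Int × Int

-- ===== PORT A =====
-- cells = {(x, y): int(value) ...}; int(value) raises ValueError on a non-digit non-space
-- char (excluded by Pre_), where ofStr?.getD 0 is exact.
def cellsA (paper : List String) : PySem.Dict pvPos Int :=
  (PySem.List.enumerate paper 0).foldl (fun d yr =>
    (PySem.List.enumerate yr.2.toList 0).foldl (fun d xv =>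
      if xv.2 ≠ ' ' then d.insert (xv.1, yr.1) ((PySem.Int.ofStr? (String.mk [xv.2])).getD 0)
      else d) d) PySem.Dict.empty

-- the key map of rotate(cube, s): ((-z*sx, y, x*sx), (x, -z*sy, y*sy))[sy != 0]
def fS (s : pvPos) (v : pvV) : pvV :=
  if s.2 ≠ 0 then (v.1, -v.2.2 * s.2, v.2.1 * s.2) else (-v.2.2 * s.1, v.2.1, v.1 * s.1)

-- dict comprehension over cube.items
def rotateA (cube : PySem.Dict pvV Int) (s : pvPos) : PySem.Dict pvV Int :=
  PySem.Dict.ofList (cube.items.map (fun p => (fS s p.1, p.2)))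

def dirsA : List pvPos := [(1, 0), (-1, 0), (0, 1), (0, -1)]

-- the body of mark's for-loop (rec = the recursive call at the smaller fuel)
def stA (rec : PySem.Dict pvV Int → PySem.Dict pvPos Int → pvPos → PySem.Dict pvV Int × PySem.Dict pvPos Int)
    (pos : pvPos) (st : PySem.Dict pvV Int × PySem.Dict pvPos Int) (s : pvPos) :
    PySem.Dict pvV Int × PySem.Dict pvPos Int :=
  let np := (pos.1 + s.1, pos.2 + s.2)
  if st.2.contains np then
    let r := rec (rotateA st.1 s) st.2 np
    (rotateA r.1 (-s.1, -s.2), r.2)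
  else st

-- mark(cube, pos), with the mutated outer dict `cells` threaded through; fuel makes the
-- recursion structural (cells shrinks at every call, so cells.size + 1 fuel is never exhausted).
-- cells[pos]: pos is in cells at every call site, so getD 0 is exact.
def markA : Nat → PySem.Dict pvV Int → PySem.Dict pvPos Int → pvPos →
    PySem.Dict pvV Int × PySem.Dict pvPos Int
  | 0, cube, cells, _ => (cube, cells)
  | f + 1, cube, cells, pos =>
    let cube' := cube.insert (0, 0, 1) (cells.getD pos 0)
    let cells' := cells.erase pos
    dirsA.foldl (stA (markA f) pos) (cube', cells')

-- cube[k] lookups: when cube.size == 6 every key is one of the six signed axis vectors, so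
-- all six are present and getD 0 is exact; && short-circuits like Python's `and`.
def checkCube (cube : PySem.Dict pvV Int) : Bool :=
  cube.size == 6 &&
    (cube.getD (1, 0, 0) 0 + cube.getD (-1, 0, 0) 0 == cube.getD (0, 1, 0) 0 + cube.getD (0, -1, 0) 0) &&
    (cube.getD (0, 1, 0) 0 + cube.getD (0, -1, 0) 0 == cube.getD (0, 0, 1) 0 + cube.getD (0, 0, -1) 0) &&
    (cube.getD (0, 0, 1) 0 + cube.getD (0, 0, -1) 0 == 7)

def paper_dice (paper : List String) : Bool :=
  -- next(iter(cells)) raises StopIteration on an all-blank paper; excluded by Pre_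
  match (cellsA paper).keys.head? with
  | none => false
  | some start =>
    checkCube (markA ((cellsA paper).size + 1) PySem.Dict.empty (cellsA paper) start).1

-- ===== PORT B =====
def cellsB (paper : List String) : PySem.Dict pvPos Int :=
  (PySem.List.enumerate paper 0).foldl (fun d yr =>
    (PySem.List.enumerate yr.2.toList 0).foldl (fun d xv =>
      if xv.2 ≠ ' ' then d.insert (xv.1, yr.1) ((PySem.Int.ofStr? (String.mk [xv.2])).getD 0)
      else d) d) PySem.Dict.empty

-- step_map(s): images of the three basis vectors under the key map of a step s
def stepMap (s : pvPos) : pvV × pvV × pvV :=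
  if s.2 = 0 then ((0, 0, s.1), (0, 1, 0), (-s.1, 0, 0))
  else ((1, 0, 0), (0, 0, s.2), (0, -s.2, 0))

-- apply(o, v): v1*o[0] + v2*o[1] + v3*o[2] componentwise
def app3 (o : pvV × pvV × pvV) (v : pvV) : pvV :=
  (v.1 * o.1.1 + v.2.1 * o.2.1.1 + v.2.2 * o.2.2.1,
   v.1 * o.1.2.1 + v.2.1 * o.2.1.2.1 + v.2.2 * o.2.2.2.1,
   v.1 * o.1.2.2 + v.2.1 * o.2.1.2.2 + v.2.2 * o.2.2.2.2)

def composeO (o : pvV × pvV × pvV) (s : pvPos) : pvV × pvV × pvV :=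
  let m := stepMap (-s.1, -s.2)
  (app3 o m.1, app3 o m.2.1, app3 o m.2.2)

def revDirs : List pvPos := [(0, -1), (0, 1), (-1, 0), (1, 0)]

def id3O : pvV × pvV × pvV := ((1, 0, 0), (0, 1, 0), (0, 0, 1))

-- erase of a present key shrinks the dict (used by walkB's termination)
theorem size_erase_lt {κ ν : Type} [BEq κ] (d : PySem.Dict κ ν) (k : κ)
    (h : d.contains k = true) : (d.erase k).size < d.size := by
  simp only [PySem.Dict.erase, PySem.Dict.size, PySem.Dict.contains, List.any_eq_true] at *
  obtain ⟨p, hp, hk⟩ := h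
  exact List.length_filter_lt_length_iff_exists.2 ⟨p, hp, by simp [hk]⟩

-- the while loop: pop an entry, skip if its cell is gone, else record the face and push
-- the four neighbour entries with composed orientations
def walkB (faces : PySem.Dict pvV Int) (cells : PySem.Dict pvPos Int)
    (stack : List (pvPos × (pvV × pvV × pvV))) : PySem.Dict pvV Int :=
  match stack with
  | [] => faces
  | (pos, o) :: rest =>
    if h : cells.contains pos then
      let v := cells.getD pos 0           -- cells.pop(pos): present, so getD 0 is exact
      let cells' := cells.erase pos
      let pushes := revDirs.foldl
        (fun st s => ((pos.1 + s.1, pos.2 + s.2), composeO o s) :: st) rest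
      walkB (faces.insert (app3 o (0, 0, 1)) v) cells' pushes
    else walkB faces cells rest
termination_by (cells.size, stack.length)
decreasing_by
  · exact Prod.Lex.left _ _ (size_erase_lt cells pos h)
  · exact Prod.Lex.right _ (by simp)

-- faces[k] lookups: when faces.size == 6 all six signed axis vectors are present, so getD 0
-- is exact; && short-circuits like Python's `and`.
def checkFaces (faces : PySem.Dict pvV Int) : Bool :=
  faces.size == 6 &&
    (faces.getD (1, 0, 0) 0 + faces.getD (-1, 0, 0) 0 == faces.getD (0, 1, 0) 0 + faces.getD (0, -1, 0) 0) &&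
    (faces.getD (0, 1, 0) 0 + faces.getD (0, -1, 0) 0 == faces.getD (0, 0, 1) 0 + faces.getD (0, 0, -1) 0) &&
    (faces.getD (0, 0, 1) 0 + faces.getD (0, 0, -1) 0 == 7)

def paper_dice_alt (paper : List String) : Bool :=
  match (cellsB paper).keys.head? with
  | none => false
  | some start => checkFaces (walkB PySem.Dict.empty (cellsB paper) [(start, id3O)])

-- ===== PRECONDITION & SPEC =====
-- Pre_ excludes exactly the inputs where the Python A raises: an all-blank paper
-- (next(iter(cells)) raises StopIteration) and any non-space non-digit character
-- (int(value) raises ValueError).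
def Pre_paper_dice (paper : List String) : Prop :=
  (paper.any (fun r => r.toList.any (fun c => c != ' '))) = true ∧
  (paper.all (fun r => r.toList.all (fun c => c == ' ' || (48 ≤ c.toNat && c.toNat ≤ 57)))) = true
instance (paper : List String) : Decidable (Pre_paper_dice paper) := by
  unfold Pre_paper_dice; infer_instance

def pvWitness_paper_dice : List String := ["17", "2345", "  6"]

def Spec_paper_dice (paper : List String) (out : Bool) : Prop := out = paper_dice_alt paper
instance (paper : List String) (out : Bool) : Decidable (Spec_paper_dice paper out) := by
  unfold Spec_paper_dice; infer_instance

-- ===== CLAIM (what is proved, stated in full; the proofs are below) =====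
def Claim_equal_paper_dice : Prop := ∀ (paper : List String), Dom_paper_dice paper → Pre_paper_dice paper → Spec_paper_dice paper (paper_dice paper)

-- ===== LEMMAS AND PROOFS =====

-- orientation algebra ---------------------------------------------------------
def comp3 (a b : pvV × pvV × pvV) : pvV × pvV × pvV := (app3 a b.1, app3 a b.2.1, app3 a b.2.2)

theorem app3_id3 (v : pvV) : app3 id3O v = v := by
  obtain ⟨a, b, c⟩ := v; simp [app3, id3O]

theorem app3_comp3 (a b : pvV × pvV × pvV) (v : pvV) :
    app3 (comp3 a b) v = app3 a (app3 b v) := by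
  obtain ⟨v1, v2, v3⟩ := v
  obtain ⟨⟨a11,a12,a13⟩,⟨a21,a22,a23⟩,⟨a31,a32,a33⟩⟩ := a
  obtain ⟨⟨b11,b12,b13⟩,⟨b21,b22,b23⟩,⟨b31,b32,b33⟩⟩ := b
  simp [app3, comp3]; refine ⟨by ring, by ring, by ring⟩

theorem comp3_assoc (a b c : pvV × pvV × pvV) :
    comp3 (comp3 a b) c = comp3 a (comp3 b c) := by
  simp only [comp3]
  exact Prod.ext (app3_comp3 a b c.1) (Prod.ext (app3_comp3 a b c.2.1) (app3_comp3 a b c.2.2))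

theorem comp3_id3_right (a : pvV × pvV × pvV) : comp3 a id3O = a := by
  obtain ⟨⟨a11,a12,a13⟩,⟨a21,a22,a23⟩,⟨a31,a32,a33⟩⟩ := a
  simp [comp3, app3, id3O]

theorem fS_eq_app3 (s : pvPos) (v : pvV) : fS s v = app3 (stepMap s) v := by
  obtain ⟨x, y, z⟩ := v
  by_cases h : s.2 = 0 <;> simp [fS, stepMap, app3, h] <;> refine ⟨by ring, by ring, by ring⟩

theorem composeO_eq (o : pvV × pvV × pvV) (s : pvPos) :
    composeO o s = comp3 o (stepMap (-s.1, -s.2)) := rfl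

theorem inj_stepMap (s : pvPos)
    (hs : s = (1,0) ∨ s = (-1,0) ∨ s = (0,1) ∨ s = (0,-1)) :
    Function.Injective (app3 (stepMap s)) := by
  intro v w h
  obtain ⟨v1, v2, v3⟩ := v; obtain ⟨w1, w2, w3⟩ := w
  rcases hs with h' | h' | h' | h' <;> subst h' <;>
    simp [app3, stepMap, Prod.mk.injEq] at h <;> simp [Prod.mk.injEq] <;> omega

theorem inj_comp3 (a b : pvV × pvV × pvV) (ha : Function.Injective (app3 a))
    (hb : Function.Injective (app3 b)) : Function.Injective (app3 (comp3 a b)) := by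
  intro v w h
  rw [app3_comp3, app3_comp3] at h
  exact hb (ha h)

theorem inj_id3 : Function.Injective (app3 id3O) := by
  intro v w h; rwa [app3_id3, app3_id3] at h

-- mapD: re-keying a dict along an orientation ---------------------------------
def mapD (o : pvV × pvV × pvV) (d : PySem.Dict pvV Int) : PySem.Dict pvV Int :=
  PySem.Dict.mk (d.items.map (fun p => (app3 o p.1, p.2)))

theorem mapD_id3 (d : PySem.Dict pvV Int) : mapD id3O d = d := by
  apply PySem.Dict.ext; simp [mapD, app3_id3]

theorem mapD_empty (o : pvV × pvV × pvV) : mapD o PySem.Dict.empty = PySem.Dict.empty := rfl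

theorem mapD_mapD (a b : pvV × pvV × pvV) (d : PySem.Dict pvV Int) :
    mapD a (mapD b d) = mapD (comp3 a b) d := by
  apply PySem.Dict.ext; simp [mapD, app3_comp3, Function.comp]

theorem keys_mapD_nodup (o : pvV × pvV × pvV) (d : PySem.Dict pvV Int)
    (ho : Function.Injective (app3 o)) (hd : d.keys.Nodup) : (mapD o d).keys.Nodup := by
  have : (mapD o d).keys = d.keys.map (app3 o) := by
    simp [mapD, PySem.Dict.keys, Function.comp]
  rw [this]
  exact hd.map ho

theorem contains_mapD (o : pvV × pvV × pvV) (d : PySem.Dict pvV Int)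
    (ho : Function.Injective (app3 o)) (k : pvV) :
    (mapD o d).contains (app3 o k) = d.contains k := by
  simp only [PySem.Dict.contains, mapD, List.any_map, Function.comp]
  exact List.any_congr rfl (fun p => by simp [ho.eq_iff])

theorem mapD_insert (o : pvV × pvV × pvV) (d : PySem.Dict pvV Int)
    (ho : Function.Injective (app3 o)) (k : pvV) (v : Int) :
    mapD o (d.insert k v) = (mapD o d).insert (app3 o k) v := by
  simp only [PySem.Dict.insert, contains_mapD o d ho k]
  by_cases h : d.contains k = true
  · simp only [h, if_true]
    apply PySem.Dict.ext
    simp only [mapD, List.map_map]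
    apply List.map_congr_left
    intro p _
    by_cases hk : p.1 = k
    · simp [Function.comp, hk]
    · have : ¬ app3 o p.1 = app3 o k := fun hc => hk (ho hc)
      simp [Function.comp, hk, this]
  · simp only [h, if_false]
    apply PySem.Dict.ext
    simp [mapD]

-- rotate re-keys the items; with distinct keys the rebuilt dict is just the mapped list
theorem ofList_nodup_keys (l : List (pvV × Int)) (h : (l.map (·.1)).Nodup) :
    PySem.Dict.ofList l = PySem.Dict.mk l := by
  apply PySem.Dict.ext
  have he : (PySem.Dict.ofList l).items =
      (PySem.Dict.empty : PySem.Dict pvV Int).items ++ l.map (fun a => (a.1, a.2)) :=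
    PySem.Dict.items_foldl_insert_fresh l Prod.fst Prod.snd PySem.Dict.empty
      (fun a _ => rfl) h
  simpa using he

theorem rotateA_eq_mapD (d : PySem.Dict pvV Int) (s : pvPos) (hd : d.keys.Nodup)
    (hs : Function.Injective (app3 (stepMap s))) :
    rotateA d s = mapD (stepMap s) d := by
  unfold rotateA
  have hkeys : ((d.items.map (fun p => (fS s p.1, p.2))).map (·.1)).Nodup := by
    have : (d.items.map (fun p => (fS s p.1, p.2))).map (·.1) = d.keys.map (app3 (stepMap s)) := by
      simp [PySem.Dict.keys, Function.comp, fS_eq_app3]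
    rw [this]
    exact hd.map hs
  rw [ofList_nodup_keys _ hkeys]
  apply PySem.Dict.ext
  simp [mapD, fS_eq_app3]

-- the common reference: orientation-carrying recursion ------------------------
def stS (rec : pvV × pvV × pvV → PySem.Dict pvV Int → PySem.Dict pvPos Int → pvPos →
      PySem.Dict pvV Int × PySem.Dict pvPos Int)
    (o : pvV × pvV × pvV) (pos : pvPos)
    (st : PySem.Dict pvV Int × PySem.Dict pvPos Int) (s : pvPos) :
    PySem.Dict pvV Int × PySem.Dict pvPos Int :=
  let np := (pos.1 + s.1, pos.2 + s.2)
  if st.2.contains np then rec (composeO o s) st.1 st.2 np else st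

def semO : Nat → pvV × pvV × pvV → PySem.Dict pvV Int → PySem.Dict pvPos Int → pvPos →
    PySem.Dict pvV Int × PySem.Dict pvPos Int
  | 0, _, faces, cells, _ => (faces, cells)
  | f + 1, o, faces, cells, pos =>
    let faces' := faces.insert (app3 o (0, 0, 1)) (cells.getD pos 0)
    let cells' := cells.erase pos
    dirsA.foldl (stS (semO f) o pos) (faces', cells')

theorem size_erase_le {κ ν : Type} [BEq κ] (d : PySem.Dict κ ν) (k : κ) :
    (d.erase k).size ≤ d.size := by
  simp only [PySem.Dict.erase, PySem.Dict.size]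
  exact List.length_filter_le _ _

theorem semO_size_le : ∀ (f : Nat) (o : pvV × pvV × pvV) (faces : PySem.Dict pvV Int)
    (cells : PySem.Dict pvPos Int) (pos : pvPos),
    (semO f o faces cells pos).2.size ≤ cells.size := by
  intro f
  induction f with
  | zero => intro o faces cells pos; exact le_refl _
  | succ f IH =>
    intro o faces cells pos
    have hfold : ∀ (ds : List pvPos) (st : PySem.Dict pvV Int × PySem.Dict pvPos Int),
        ((ds.foldl (stS (semO f) o pos) st).2.size ≤ st.2.size) := by
      intro ds
      induction ds with
      | nil => intro st; exact le_refl _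
      | cons s ds ihds =>
        intro st
        refine le_trans (ihds _) ?_
        simp only [stS]
        split
        · exact IH _ _ _ _
        · exact le_refl _
    calc (semO (f + 1) o faces cells pos).2.size
        ≤ (cells.erase pos).size := hfold dirsA _
      _ ≤ cells.size := size_erase_le cells pos

theorem neg_dir (s : pvPos) (hs : s = (1,0) ∨ s = (-1,0) ∨ s = (0,1) ∨ s = (0,-1)) :
    ((-s.1, -s.2) : pvPos) = (1,0) ∨ ((-s.1, -s.2) : pvPos) = (-1,0) ∨
    ((-s.1, -s.2) : pvPos) = (0,1) ∨ ((-s.1, -s.2) : pvPos) = (0,-1) := by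
  rcases hs with h | h | h | h <;> subst h <;> simp

theorem comp3_neg_stepMap (s : pvPos) (hs : s = (1,0) ∨ s = (-1,0) ∨ s = (0,1) ∨ s = (0,-1)) :
    comp3 (stepMap (-s.1, -s.2)) (stepMap s) = id3O := by
  rcases hs with h | h | h | h <;> subst h <;> decide

-- one loop iteration of mark corresponds to one stS step, conjugated by o
theorem step_corr (f : Nat) (o : pvV × pvV × pvV) (pos s : pvPos)
    (hs : s = (1,0) ∨ s = (-1,0) ∨ s = (0,1) ∨ s = (0,-1))
    (IH : ∀ (o : pvV × pvV × pvV) (cube : PySem.Dict pvV Int)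
        (cells : PySem.Dict pvPos Int) (pos : pvPos),
        Function.Injective (app3 o) → cube.keys.Nodup →
        mapD o (markA f cube cells pos).1 = (semO f o (mapD o cube) cells pos).1 ∧
        (markA f cube cells pos).2 = (semO f o (mapD o cube) cells pos).2 ∧
        (markA f cube cells pos).1.keys.Nodup)
    (cube : PySem.Dict pvV Int) (cells : PySem.Dict pvPos Int)
    (hinj : Function.Injective (app3 o)) (hnd : cube.keys.Nodup) :
    mapD o (stA (markA f) pos (cube, cells) s).1 = (stS (semO f) o pos (mapD o cube, cells) s).1 ∧
    (stA (markA f) pos (cube, cells) s).2 = (stS (semO f) o pos (mapD o cube, cells) s).2 ∧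
    (stA (markA f) pos (cube, cells) s).1.keys.Nodup := by
  simp only [stA, stS]
  by_cases h : cells.contains (pos.1 + s.1, pos.2 + s.2) = true
  · simp only [h, if_true]
    have hsM := inj_stepMap s hs
    have hsN := inj_stepMap _ (neg_dir s hs)
    have h1 : rotateA cube s = mapD (stepMap s) cube := rotateA_eq_mapD _ _ hnd hsM
    have ho' : Function.Injective (app3 (composeO o s)) := by
      rw [composeO_eq]; exact inj_comp3 _ _ hinj hsN
    have hnd' : (rotateA cube s).keys.Nodup := by
      rw [h1]; exact keys_mapD_nodup _ _ hsM hnd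
    obtain ⟨e1, e2, e3⟩ := IH (composeO o s) (rotateA cube s) cells
      (pos.1 + s.1, pos.2 + s.2) ho' hnd'
    have hmm : mapD (composeO o s) (rotateA cube s) = mapD o cube := by
      rw [h1, mapD_mapD, composeO_eq, comp3_assoc, comp3_neg_stepMap s hs, comp3_id3_right]
    rw [hmm] at e1 e2
    refine ⟨?_, e2, ?_⟩
    · rw [rotateA_eq_mapD _ _ e3 hsN, mapD_mapD, ← composeO_eq, e1]
    · rw [rotateA_eq_mapD _ _ e3 hsN]
      exact keys_mapD_nodup _ _ hsN e3
  · simp only [h, if_false]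
    exact ⟨rfl, rfl, hnd⟩

-- L1: A's rotate-everything recursion is semO seen through the orientation o
theorem markA_eq_semO : ∀ (f : Nat) (o : pvV × pvV × pvV) (cube : PySem.Dict pvV Int)
    (cells : PySem.Dict pvPos Int) (pos : pvPos),
    Function.Injective (app3 o) → cube.keys.Nodup →
    mapD o (markA f cube cells pos).1 = (semO f o (mapD o cube) cells pos).1 ∧
    (markA f cube cells pos).2 = (semO f o (mapD o cube) cells pos).2 ∧
    (markA f cube cells pos).1.keys.Nodup := by
  intro f
  induction f with
  | zero => intro o cube cells pos hinj hnd; exact ⟨rfl, rfl, hnd⟩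
  | succ f IH =>
    intro o cube cells pos hinj hnd
    have hfold : ∀ (ds : List pvPos),
        (∀ s ∈ ds, s = ((1:Int),(0:Int)) ∨ s = (-1,0) ∨ s = (0,1) ∨ s = (0,-1)) →
        ∀ (sa : PySem.Dict pvV Int × PySem.Dict pvPos Int),
        sa.1.keys.Nodup →
        mapD o (ds.foldl (stA (markA f) pos) sa).1 =
          (ds.foldl (stS (semO f) o pos) (mapD o sa.1, sa.2)).1 ∧
        (ds.foldl (stA (markA f) pos) sa).2 =
          (ds.foldl (stS (semO f) o pos) (mapD o sa.1, sa.2)).2 ∧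
        (ds.foldl (stA (markA f) pos) sa).1.keys.Nodup := by
      intro ds
      induction ds with
      | nil => intro _ sa hsa; exact ⟨rfl, rfl, hsa⟩
      | cons s ds ihds =>
        intro hmem sa hsa
        have hstep := step_corr f o pos s (hmem s (by simp)) IH sa.1 sa.2 hinj hsa
        simp only [List.foldl_cons]
        have hrec := ihds (fun t ht => hmem t (by simp [ht]))
          (stA (markA f) pos (sa.1, sa.2) s) hstep.2.2
        have heq : (mapD o (stA (markA f) pos (sa.1, sa.2) s).1,
            (stA (markA f) pos (sa.1, sa.2) s).2) =
            stS (semO f) o pos (mapD o sa.1, sa.2) s :=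
          Prod.ext hstep.1 hstep.2.1
        rw [← heq]
        exact hrec
    have hmemd : ∀ s ∈ dirsA, s = ((1:Int),(0:Int)) ∨ s = (-1,0) ∨ s = (0,1) ∨ s = (0,-1) := by
      intro s hs; simpa [dirsA] using hs
    have h0 := hfold dirsA hmemd
      (cube.insert (0, 0, 1) (cells.getD pos 0), cells.erase pos)
      (PySem.Dict.nodup_keys_insert _ _ _ hnd)
    simp only [markA, semO]
    rw [← mapD_insert o cube hinj (0, 0, 1) (cells.getD pos 0)]
    exact h0

theorem walkB_cons (faces : PySem.Dict pvV Int) (cells : PySem.Dict pvPos Int)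
    (p : pvPos) (o : pvV × pvV × pvV) (rest : List (pvPos × (pvV × pvV × pvV))) :
    walkB faces cells ((p, o) :: rest) =
      if cells.contains p then
        walkB (faces.insert (app3 o (0, 0, 1)) (cells.getD p 0)) (cells.erase p)
          (revDirs.foldl (fun st s => ((p.1 + s.1, p.2 + s.2), composeO o s) :: st) rest)
      else walkB faces cells rest := by
  rw [walkB]; split <;> rfl

-- L2: the explicit stack executes semO's pending calls in the same order
theorem walkB_eq_semO : ∀ (f : Nat) (cells : PySem.Dict pvPos Int), cells.size < f →
    ∀ (pos : pvPos) (o : pvV × pvV × pvV) (faces : PySem.Dict pvV Int)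
      (rest : List (pvPos × (pvV × pvV × pvV))), cells.contains pos = true →
    walkB faces cells ((pos, o) :: rest) =
      walkB (semO f o faces cells pos).1 (semO f o faces cells pos).2 rest := by
  intro f
  induction f with
  | zero => intro cells h; omega
  | succ f IH =>
    intro cells hsize pos o faces rest hc
    have hlaux : ∀ (ds : List pvPos) (st : PySem.Dict pvV Int × PySem.Dict pvPos Int)
        (rest : List (pvPos × (pvV × pvV × pvV))), st.2.size < f →
        walkB st.1 st.2
            (ds.map (fun s => ((pos.1 + s.1, pos.2 + s.2), composeO o s)) ++ rest) =
          walkB (ds.foldl (stS (semO f) o pos) st).1 (ds.foldl (stS (semO f) o pos) st).2 rest := by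
      intro ds
      induction ds with
      | nil => intro st rest _; rfl
      | cons s ds ihds =>
        intro st rest hst
        simp only [List.map_cons, List.cons_append, List.foldl_cons]
        by_cases h : st.2.contains (pos.1 + s.1, pos.2 + s.2) = true
        · rw [IH st.2 hst (pos.1 + s.1, pos.2 + s.2) (composeO o s) st.1 _ h]
          have hst' : (semO f (composeO o s) st.1 st.2 (pos.1 + s.1, pos.2 + s.2)).2.size < f :=
            lt_of_le_of_lt (semO_size_le f _ _ _ _) hst
          have := ihds (semO f (composeO o s) st.1 st.2 (pos.1 + s.1, pos.2 + s.2)) rest hst'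
          simp only [stS, h, if_true]
          exact this
        · rw [walkB_cons]
          simp only [Bool.not_eq_true] at h
          rw [h, if_neg (by simp)]
          simp only [stS, h]
          exact ihds st rest hst
    rw [walkB_cons, if_pos hc]
    have hpush : (revDirs.foldl (fun st s => ((pos.1 + s.1, pos.2 + s.2), composeO o s) :: st) rest) =
        dirsA.map (fun s => ((pos.1 + s.1, pos.2 + s.2), composeO o s)) ++ rest := by
      simp only [revDirs, dirsA, List.foldl_cons, List.foldl_nil, List.map_cons,
        List.map_nil, List.cons_append, List.nil_append]
    rw [hpush]
    have hsz : (cells.erase pos).size < f := by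
      have := size_erase_lt cells pos hc; omega
    have := hlaux dirsA
      (faces.insert (app3 o (0, 0, 1)) (cells.getD pos 0), cells.erase pos) rest hsz
    simp only [semO]
    exact this

theorem contains_of_head_keys {κ ν : Type} [BEq κ] [LawfulBEq κ] (d : PySem.Dict κ ν) (k : κ)
    (h : d.keys.head? = some k) : d.contains k = true := by
  simp only [PySem.Dict.keys] at h
  cases hd : d.items with
  | nil => rw [hd] at h; simp at h
  | cons p rest =>
    rw [hd] at h
    simp only [List.map_cons, List.head?_cons, Option.some.injEq] at h
    simp [PySem.Dict.contains, hd, List.any_cons, h]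

-- ===== VERDICT (by name: the statement is the Claim_ definition above) =====
theorem paper_dice_spec : Claim_equal_paper_dice := by
  intro paper _ _
  unfold Spec_paper_dice paper_dice paper_dice_alt
  have hcells : cellsB paper = cellsA paper := rfl
  rw [hcells]
  cases hh : (cellsA paper).keys.head? with
  | none => rfl
  | some start =>
    have hc : (cellsA paper).contains start = true := contains_of_head_keys _ _ hh
    have h1 := markA_eq_semO ((cellsA paper).size + 1) id3O PySem.Dict.empty
      (cellsA paper) start inj_id3 (by simp [PySem.Dict.keys, PySem.Dict.empty])
    have h2 := walkB_eq_semO ((cellsA paper).size + 1) (cellsA paper) (by omega)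
      start id3O PySem.Dict.empty [] hc
    dsimp only
    rw [h2]
    have : walkB (semO ((cellsA paper).size + 1) id3O PySem.Dict.empty (cellsA paper) start).1
        (semO ((cellsA paper).size + 1) id3O PySem.Dict.empty (cellsA paper) start).2 [] =
        (semO ((cellsA paper).size + 1) id3O PySem.Dict.empty (cellsA paper) start).1 := by
      rw [walkB]
    rw [this]
    rw [mapD_empty id3O] at h1
    rw [← h1.1, mapD_id3]
    rfl
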